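-- pv_equiv track=rewrite | github.com/sil-ai/aqua-api | inference_routes/v3/eflomal_scoring.py | _build_reverse_dictionary
-- ===== SOURCE A (Python) =====
-- from collections import defaultdict
--
-- def _build_reverse_dictionary(dictionary: dict, min_count: int = 3) -> dict:
--     """Build reverse lookup: tgt_norm -> [(src_norm, count), ...] sorted desc by count."""
--     reverse: dict = defaultdict(list)
--     for (src, tgt), info in dictionary.items():
--         if info["count"] >= min_count:
--             reverse[tgt].append((src, info["count"]))
--     for tgt in reverse:
--         reverse[tgt].sort(key=lambda x: x[1], reverse=True)
--     return dict(reverse)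
-- ===== SOURCE B (Python) =====
-- def _build_reverse_dictionary(dictionary: dict, min_count: int = 3) -> dict:
--     """Build reverse lookup: tgt_norm -> [(src_norm, count), ...] sorted desc by count."""
--     triples = [(tgt, src, info["count"])
--                for (src, tgt), info in dictionary.items()
--                if info["count"] >= min_count]
--     reverse = {tgt: [] for (tgt, _, _) in triples}
--     triples.sort(key=lambda t: t[2], reverse=True)  # one global stable sort
--     for tgt, src, count in triples:
--         reverse[tgt].append((src, count))
--     return reverse
-- ===== Notes on version B (the rewrite author's own statement) =====
-- stated objective: alternative
-- what changed: A groups first (defaultdict append per key) and then stably sorts each group's list separately; B filters into one flat triple list, does ONE global stable sort by count descending, and then groups the sorted triples into a dict whose keys were pre-seeded in first-occurrence order, so the per-group sorts disappear.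
import Mathlib
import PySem

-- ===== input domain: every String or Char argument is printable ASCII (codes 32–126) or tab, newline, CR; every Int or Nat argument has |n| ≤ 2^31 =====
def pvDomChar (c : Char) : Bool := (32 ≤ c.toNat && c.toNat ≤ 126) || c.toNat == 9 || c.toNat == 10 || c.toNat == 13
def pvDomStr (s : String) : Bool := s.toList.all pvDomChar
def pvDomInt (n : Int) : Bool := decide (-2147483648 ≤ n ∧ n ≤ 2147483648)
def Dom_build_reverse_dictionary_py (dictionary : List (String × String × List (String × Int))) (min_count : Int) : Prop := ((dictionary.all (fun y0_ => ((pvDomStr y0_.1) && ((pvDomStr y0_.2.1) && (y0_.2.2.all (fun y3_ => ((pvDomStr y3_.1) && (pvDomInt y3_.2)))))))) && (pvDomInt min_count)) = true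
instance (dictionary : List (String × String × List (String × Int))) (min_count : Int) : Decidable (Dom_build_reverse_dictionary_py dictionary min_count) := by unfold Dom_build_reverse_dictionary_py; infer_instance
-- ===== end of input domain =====

-- B replaces A's group-then-sort-each-group loop by one global stable sort of the
-- filtered triples followed by a grouping pass (alternative decomposition, same cost).

-- ===== PORT A =====
-- A: defaultdict(list) grouping pass, then an in-place sort (by count, reverse=True) per key.
def build_reverse_dictionary_py (dictionary : List (String × String × List (String × Int))) (min_count : Int) : List (String × List (String × Int)) :=
  let reverse : PySem.Dict String (List (String × Int)) :=
    dictionary.foldl (fun d e =>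
      let cnt : Int := PySem.Dict.getD (PySem.Dict.mk e.2.2) "count" 0
      if cnt ≥ min_count then d.modify e.2.1 [] (fun v => v ++ [(e.1, cnt)]) else d)
      PySem.Dict.empty
  reverse.items.map (fun p => (p.1, PySem.List.sorted p.2 (fun x => x.2) true))

-- ===== PORT B =====
-- B: filtered triples (tgt, src, count); keys pre-seeded in first-occurrence order;
-- one global stable sort by count descending; then append each (src, count) to its group.
def build_reverse_dictionary_py_alt (dictionary : List (String × String × List (String × Int))) (min_count : Int) : List (String × List (String × Int)) :=
  let triples : List (String × String × Int) :=
    dictionary.filterMap (fun e =>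
      let cnt : Int := PySem.Dict.getD (PySem.Dict.mk e.2.2) "count" 0
      if cnt ≥ min_count then some (e.2.1, e.1, cnt) else none)
  let reverse0 : PySem.Dict String (List (String × Int)) :=
    triples.foldl (fun d t => d.insert t.1 []) PySem.Dict.empty
  let sortedT : List (String × String × Int) := PySem.List.sorted triples (fun t => t.2.2) true
  let final : PySem.Dict String (List (String × Int)) :=
    sortedT.foldl (fun d t => d.insert t.1 (d.getD t.1 [] ++ [(t.2.1, t.2.2)])) reverse0
  final.items

-- ===== PRECONDITION & SPEC =====
-- Pre_ excludes exactly the inputs where Python A raises KeyError: some entry's info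
-- dict has no "count" key (A evaluates info["count"] for every entry).
def Pre_build_reverse_dictionary_py (dictionary : List (String × String × List (String × Int))) (min_count : Int) : Prop :=
  ∀ e ∈ dictionary, (PySem.Dict.mk e.2.2).contains "count" = true
instance (dictionary : List (String × String × List (String × Int))) (min_count : Int) : Decidable (Pre_build_reverse_dictionary_py dictionary min_count) := by unfold Pre_build_reverse_dictionary_py; infer_instance
def pvWitness_build_reverse_dictionary_py : (List (String × String × List (String × Int))) × Int :=
  ([("a", "x", [("count", 3)]), ("b", "x", [("count", 5)])], 2)
def Spec_build_reverse_dictionary_py (dictionary : List (String × String × List (String × Int))) (min_count : Int) (out : List (String × List (String × Int))) : Prop := out = build_reverse_dictionary_py_alt dictionary min_count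
instance (dictionary : List (String × String × List (String × Int))) (min_count : Int) (out : List (String × List (String × Int))) : Decidable (Spec_build_reverse_dictionary_py dictionary min_count out) := by unfold Spec_build_reverse_dictionary_py; infer_instance

-- ===== CLAIM (what is proved, stated in full; the proofs are below) =====
def Claim_equal_build_reverse_dictionary_py : Prop := ∀ (dictionary : List (String × String × List (String × Int))) (min_count : Int), Dom_build_reverse_dictionary_py dictionary min_count → Pre_build_reverse_dictionary_py dictionary min_count → Spec_build_reverse_dictionary_py dictionary min_count (build_reverse_dictionary_py dictionary min_count)

-- ===== LEMMAS AND PROOFS =====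


-- q x = false: inserting x and then filtering is the same as filtering the old list.
theorem pv_filter_insertBy_neg {α : Type} (q : α → Bool) (before : α → α → Bool) (x : α)
    (ys : List α) (hx : q x = false) :
    (PySem.List.insertBy before x ys).filter q = ys.filter q := by
  induction ys with
  | nil => simp [PySem.List.insertBy, hx]
  | cons y t ih => by_cases h : before x y <;> simp [PySem.List.insertBy, h, hx, List.filter_cons, ih]

-- x belongs before every element: insertBy puts it at the front.
theorem pv_insertBy_front {α : Type} (before : α → α → Bool) (x : α) (l : List α)
    (h : ∀ z ∈ l, before x z = true) :
    PySem.List.insertBy before x l = x :: l := by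
  cases l with
  | nil => rfl
  | cons y t => simp [PySem.List.insertBy, h y (by simp)]

-- q x = true and ys descending by key: filtering commutes with inserting x.
theorem pv_filter_insertBy_pos {α : Type} (q : α → Bool) (key : α → Int) (x : α) (ys : List α)
    (hx : q x = true) (hs : ys.Pairwise (fun a b => key b ≤ key a)) :
    (PySem.List.insertBy (fun a b => decide (key b < key a)) x ys).filter q
      = PySem.List.insertBy (fun a b => decide (key b < key a)) x (ys.filter q) := by
  induction ys with
  | nil => simp [PySem.List.insertBy, hx]
  | cons y t ih =>
    obtain ⟨hy, ht⟩ := List.pairwise_cons.1 hs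
    by_cases h : key y < key x
    · by_cases hqy : q y = true
      · simp [PySem.List.insertBy, h, hx, hqy]
      · have hfront : ∀ z ∈ t.filter q, (fun a b => decide (key b < key a)) x z = true := by
          intro z hz
          have hzy := hy z (List.mem_of_mem_filter hz)
          simp only [decide_eq_true_eq]
          omega
        rw [show PySem.List.insertBy (fun a b => decide (key b < key a)) x (y :: t)
              = x :: y :: t by simp [PySem.List.insertBy, h]]
        simp only [List.filter_cons, hx, hqy, if_true, if_false, Bool.false_eq_true]
        rw [pv_insertBy_front _ _ _ hfront]
    · rw [show PySem.List.insertBy (fun a b => decide (key b < key a)) x (y :: t)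
            = y :: PySem.List.insertBy (fun a b => decide (key b < key a)) x t by
          simp [PySem.List.insertBy, h]]
      by_cases hqy : q y = true
      · simp [hqy, ih ht, PySem.List.insertBy, h]
      · simp [hqy, ih ht]

-- sorted(l + [x]) = insert x into sorted(l)   (reverse=True form)
theorem pv_sorted_rev_append_singleton {α : Type} (key : α → Int) (m : List α) (x : α) :
    PySem.List.sorted (m ++ [x]) key true
      = PySem.List.insertBy (fun a b => decide (key b < key a)) x (PySem.List.sorted m key true) := by
  rw [PySem.List.sorted_rev_eq_foldl_insertBy, PySem.List.sorted_rev_eq_foldl_insertBy,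
    List.foldl_append, List.foldl_cons, List.foldl_nil]

-- a STABLE sort commutes with filtering.
theorem pv_sorted_rev_filter {α : Type} (q : α → Bool) (key : α → Int) (l : List α) :
    (PySem.List.sorted l key true).filter q = PySem.List.sorted (l.filter q) key true := by
  induction l using List.reverseRecOn with
  | nil => simp [PySem.List.sorted]
  | append_singleton m x ih =>
    rw [pv_sorted_rev_append_singleton, List.filter_append]
    by_cases hx : q x = true
    · rw [pv_filter_insertBy_pos q key x _ hx (PySem.List.sorted_pairwise_rev m key), ih]
      simp only [List.filter_cons, hx, if_true, List.filter_nil]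
      rw [pv_sorted_rev_append_singleton]
    · rw [pv_filter_insertBy_neg q _ x _ (by simpa using hx), ih]
      simp [hx]

theorem pv_map_insertBy {α β : Type} (f : α → β) (before : β → β → Bool) (x : α) (l : List α) :
    (PySem.List.insertBy (fun a b => before (f a) (f b)) x l).map f
      = PySem.List.insertBy before (f x) (l.map f) := by
  induction l with
  | nil => simp [PySem.List.insertBy]
  | cons y t ih => by_cases h : before (f x) (f y) <;> simp [PySem.List.insertBy, h, ih]

-- sorting by (key ∘ f) and then mapping f = mapping f and then sorting by key.
theorem pv_sorted_rev_map {α β : Type} (f : α → β) (key : β → Int) (l : List α) :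
    (PySem.List.sorted l (fun a => key (f a)) true).map f
      = PySem.List.sorted (l.map f) key true := by
  induction l using List.reverseRecOn with
  | nil => simp [PySem.List.sorted]
  | append_singleton m x ih =>
    rw [pv_sorted_rev_append_singleton, List.map_append, List.map_singleton,
      pv_sorted_rev_append_singleton, ← ih]
    exact pv_map_insertBy f (fun u v => decide (key v < key u)) x _

-- A's filtered grouping loop = the same grouping loop over the filtered triples.
theorem pv_foldA_filterMap (min_count : Int) (l : List (String × String × List (String × Int)))
    (d : PySem.Dict String (List (String × Int))) :
    l.foldl (fun d e =>
        let cnt : Int := PySem.Dict.getD (PySem.Dict.mk e.2.2) "count" 0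
        if cnt ≥ min_count then d.modify e.2.1 [] (fun v => v ++ [(e.1, cnt)]) else d) d
      = (l.filterMap (fun e =>
          let cnt : Int := PySem.Dict.getD (PySem.Dict.mk e.2.2) "count" 0
          if cnt ≥ min_count then some (e.2.1, e.1, cnt) else none)).foldl
          (fun d x => d.modify x.1 [] (fun v => v ++ [x.2])) d := by
  induction l generalizing d with
  | nil => rfl
  | cons e l ih =>
    simp only [List.foldl_cons, List.filterMap_cons]
    by_cases h : PySem.Dict.getD (PySem.Dict.mk e.2.2) "count" 0 ≥ min_count <;>
      simp [h, ih]

-- a loop inserting [] for every key leaves every getD _ [] at [].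
theorem pv_getD_foldl_insert_nil (l : List (String × String × Int))
    (d : PySem.Dict String (List (String × Int))) (k : String) (h : d.getD k [] = []) :
    (l.foldl (fun d x => d.insert x.1 ([] : List (String × Int))) d).getD k [] = [] := by
  induction l generalizing d with
  | nil => exact h
  | cons x l ih =>
    simp only [List.foldl_cons]
    apply ih
    rw [PySem.Dict.getD_insert]
    split <;> simp [h]

-- the core: group-then-sort-per-key (A) = seed-keys, global stable sort, group (B).
theorem pv_core (t : List (String × String × Int)) :
    ((t.foldl (fun d x => d.modify x.1 [] (fun v => v ++ [x.2])) PySem.Dict.empty).items).map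
        (fun p => (p.1, PySem.List.sorted p.2 (fun x => x.2) true))
      = ((PySem.List.sorted t (fun x => x.2.2) true).foldl
          (fun d x => d.insert x.1 (d.getD x.1 [] ++ [(x.2.1, x.2.2)]))
          (t.foldl (fun d x => d.insert x.1 ([] : List (String × Int))) PySem.Dict.empty)).items := by
  have hbody : (fun (d : PySem.Dict String (List (String × Int))) (x : String × String × Int) =>
      d.insert x.1 (d.getD x.1 [] ++ [(x.2.1, x.2.2)]))
      = fun d x => d.modify x.1 [] (fun v => v ++ [x.2]) := rfl
  rw [hbody]
  have hGnd : (t.foldl (fun d x => d.modify x.1 [] (fun v => v ++ [x.2]))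
      PySem.Dict.empty).keys.Nodup :=
    PySem.Dict.nodup_keys_foldl_modify_key t (fun x => x.1) [] (fun _ x v => v ++ [x.2]) _
      (by simp [PySem.Dict.keys_empty])
  have hInd : (t.foldl (fun d x => d.insert x.1 ([] : List (String × Int)))
      PySem.Dict.empty).keys.Nodup :=
    PySem.Dict.nodup_keys_foldl_insert_key t (fun x => x.1) (fun _ _ => []) _
      (by simp [PySem.Dict.keys_empty])
  have hFnd : ((PySem.List.sorted t (fun x => x.2.2) true).foldl
      (fun d x => d.modify x.1 [] (fun v => v ++ [x.2]))
      (t.foldl (fun d x => d.insert x.1 ([] : List (String × Int))) PySem.Dict.empty)).keys.Nodup :=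
    PySem.Dict.nodup_keys_foldl_modify_key (PySem.List.sorted t (fun x => x.2.2) true)
      (fun x => x.1) [] (fun _ x v => v ++ [x.2]) _ hInd
  rw [PySem.Dict.items_eq_map_keys _ hGnd ([] : List (String × Int)),
    PySem.Dict.items_eq_map_keys _ hFnd ([] : List (String × Int)), List.map_map]
  have hGk : (t.foldl (fun d x => d.modify x.1 [] (fun v => v ++ [x.2]))
      PySem.Dict.empty).keys = PySem.Set.ofList (t.map (fun x => x.1)) := by
    rw [PySem.Dict.keys_foldl_modify_key]
    simp [PySem.Dict.keys_empty, PySem.Set.update_nil_left]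
  have hIk : (t.foldl (fun d x => d.insert x.1 ([] : List (String × Int)))
      PySem.Dict.empty).keys = PySem.Set.ofList (t.map (fun x => x.1)) := by
    rw [PySem.Dict.keys_foldl_insert_key]
    simp [PySem.Dict.keys_empty, PySem.Set.update_nil_left]
  have hFk : ((PySem.List.sorted t (fun x => x.2.2) true).foldl
      (fun d x => d.modify x.1 [] (fun v => v ++ [x.2]))
      (t.foldl (fun d x => d.insert x.1 ([] : List (String × Int))) PySem.Dict.empty)).keys
      = PySem.Set.ofList (t.map (fun x => x.1)) := by
    rw [PySem.Dict.keys_foldl_modify_key, hIk, PySem.Set.update_eq_append_filter]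
    have hmem : ∀ y ∈ PySem.Set.ofList ((PySem.List.sorted t (fun x => x.2.2) true).map (fun x => x.1)),
        (PySem.Set.ofList (t.map (fun x => x.1))).contains y = true := by
      intro y hy
      rw [PySem.Set.mem_ofList] at hy
      rw [PySem.Set.contains_iff, PySem.Set.mem_ofList]
      rcases List.mem_map.1 hy with ⟨z, hz, rfl⟩
      have hzt : z ∈ t := (PySem.List.mem_sorted _ _ _ _).mp hz
      exact List.mem_map_of_mem hzt
    have : (PySem.Set.ofList ((PySem.List.sorted t (fun x => x.2.2) true).map (fun x => x.1))).filter
        (fun y => !(PySem.Set.ofList (t.map (fun x => x.1))).contains y) = [] := by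
      rw [List.filter_eq_nil_iff]
      intro y hy
      rw [hmem y hy]
      simp
    rw [this, List.append_nil]
  rw [hGk, hFk]
  apply List.map_congr_left
  intro k hk
  simp only [Function.comp_apply]
  have hG : (t.foldl (fun d x => d.modify x.1 [] (fun v => v ++ [x.2]))
      PySem.Dict.empty).getD k [] = (t.filter (fun p => p.1 == k)).map (fun x => x.2) := by
    simpa [PySem.Dict.getD_empty] using
      PySem.Dict.getD_foldl_modify_append t PySem.Dict.empty k
  have hF : ((PySem.List.sorted t (fun x => x.2.2) true).foldl
      (fun d x => d.modify x.1 [] (fun v => v ++ [x.2]))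
      (t.foldl (fun d x => d.insert x.1 ([] : List (String × Int))) PySem.Dict.empty)).getD k []
      = ((PySem.List.sorted t (fun x => x.2.2) true).filter (fun p => p.1 == k)).map
          (fun x => x.2) := by
    rw [PySem.Dict.getD_foldl_modify_append,
      pv_getD_foldl_insert_nil t _ k (by simp [PySem.Dict.getD_empty]), List.nil_append]
  rw [hG, hF]
  refine Prod.ext rfl ?_
  have hcomm : ((PySem.List.sorted t (fun x => x.2.2) true).filter (fun p => p.1 == k)).map
      (fun x => x.2)
      = PySem.List.sorted ((t.filter (fun p => p.1 == k)).map (fun x => x.2))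
          (fun x => x.2) true := by
    rw [pv_sorted_rev_filter (fun p => p.1 == k) (fun x => x.2.2) t]
    exact pv_sorted_rev_map (fun x => x.2) (fun x => x.2) (t.filter (fun p => p.1 == k))
  rw [hcomm]

-- ===== VERDICT (by name: the statement is the Claim_ definition above) =====
theorem build_reverse_dictionary_py_spec : Claim_equal_build_reverse_dictionary_py := by
  intro dictionary min_count _ _
  unfold Spec_build_reverse_dictionary_py
  simp only [build_reverse_dictionary_py, build_reverse_dictionary_py_alt]
  rw [pv_foldA_filterMap]
  exact pv_core _
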